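-- pv_equiv track=rewrite | github.com/Dewakaran0416/Payer-Risk-Engine | python/payer_risk_engine.py | notes_to_action
-- ===== SOURCE A (Python) =====
-- def notes_to_action(notes: str) -> str:
--     """Feature 3: infer suggested action from prior activity notes when no denial code."""
--     if not notes: return ""
--     t = notes.lower()
--     parts = []
--     if any(w in t for w in ["modifier","mod 25","mod 51","mod 59","add mod"]):
--         parts.append("Review modifier — prior notes show modifier was added previously")
--     if any(w in t for w in ["medical record","mr","appeal"]):
--         parts.append("Prepare Medical Records (MR) — prior notes indicate MR submission was required")
--     if any(w in t for w in ["adjust","non-billable","non billable","write off","write-off"]):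
--         parts.append("Consult coding team — prior notes indicate code adjustment may be needed")
--     if any(w in t for w in ["auth","authorization","prior auth"]):
--         parts.append("Verify authorization — prior notes indicate auth was required")
--     if any(w in t for w in ["bill patient","patient pay","deductible","copay"]):
--         parts.append("Bill patient — prior notes indicate patient financial responsibility")
--     if any(w in t for w in ["resubmit","corrected","re-filed","reprocessed"]):
--         parts.append("Resubmit with corrections — prior notes indicate resubmission resolved similar claims")
--     if any(w in t for w in ["timely","filing","deadline"]):
--         parts.append("Check timely filing window — prior notes reference filing deadline concerns")
--     return "  |  ".join(parts) if parts else \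
--            "Review prior activity notes — manual review recommended; no clear action pattern found"
-- ===== SOURCE B (Python) =====
-- RULES = [
--     (["modifier","mod 25","mod 51","mod 59","add mod"],
--      "Review modifier — prior notes show modifier was added previously"),
--     (["medical record","mr","appeal"],
--      "Prepare Medical Records (MR) — prior notes indicate MR submission was required"),
--     (["adjust","non-billable","non billable","write off","write-off"],
--      "Consult coding team — prior notes indicate code adjustment may be needed"),
--     (["auth","authorization","prior auth"],
--      "Verify authorization — prior notes indicate auth was required"),
--     (["bill patient","patient pay","deductible","copay"],
--      "Bill patient — prior notes indicate patient financial responsibility"),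
--     (["resubmit","corrected","re-filed","reprocessed"],
--      "Resubmit with corrections — prior notes indicate resubmission resolved similar claims"),
--     (["timely","filing","deadline"],
--      "Check timely filing window — prior notes reference filing deadline concerns"),
-- ]
--
-- def notes_to_action(notes: str) -> str:
--     if not notes:
--         return ""
--     t = notes.lower()
--     matched = set()
--     # single left-to-right scan: at each position, match all rules' keywords there
--     for i in range(len(t)):
--         for r, (kws, _action) in enumerate(RULES):
--             if r not in matched and any(t[i:i+len(k)] == k for k in kws):
--                 matched.add(r)
--     parts = [action for r, (_kws, action) in enumerate(RULES) if r in matched]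
--     return "  |  ".join(parts) if parts else \
--            "Review prior activity notes — manual review recommended; no clear action pattern found"
-- ===== Notes on version B (the rewrite author's own statement) =====
-- stated objective: alternative
-- what changed: Replaces seven per-keyword substring-membership tests with a single left-to-right scan of the lowercased text (a naive multi-pattern matcher): at each position every not-yet-matched rule is tested by slice comparison, matched rule indices are collected in a set, and actions are emitted in rule order.
import Mathlib
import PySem

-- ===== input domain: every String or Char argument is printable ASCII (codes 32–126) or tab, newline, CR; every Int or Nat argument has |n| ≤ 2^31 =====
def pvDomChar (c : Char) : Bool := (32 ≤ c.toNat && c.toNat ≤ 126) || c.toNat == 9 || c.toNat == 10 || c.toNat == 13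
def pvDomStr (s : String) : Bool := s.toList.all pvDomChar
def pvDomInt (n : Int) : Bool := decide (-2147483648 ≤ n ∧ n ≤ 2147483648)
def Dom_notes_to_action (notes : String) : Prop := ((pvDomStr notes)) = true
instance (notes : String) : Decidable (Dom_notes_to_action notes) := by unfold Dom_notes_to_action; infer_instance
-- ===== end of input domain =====

-- B replaces A's seven per-keyword substring-membership tests by a single left-to-right positional
-- scan of the lowercased text (naive multi-pattern matching by slice comparison, matched rule
-- indices collected in a set); objective: alternative algorithm, same cost.

-- ===== PORT A =====
def notes_to_action (notes : String) : String :=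
  if PySem.Str.len notes == 0 then "" else
  let t := PySem.Str.lower notes
  let parts : List String := []
  let parts := if (["modifier","mod 25","mod 51","mod 59","add mod"].any (fun w => PySem.Str.isIn w t)) then parts ++ ["Review modifier — prior notes show modifier was added previously"] else parts
  let parts := if (["medical record","mr","appeal"].any (fun w => PySem.Str.isIn w t)) then parts ++ ["Prepare Medical Records (MR) — prior notes indicate MR submission was required"] else parts
  let parts := if (["adjust","non-billable","non billable","write off","write-off"].any (fun w => PySem.Str.isIn w t)) then parts ++ ["Consult coding team — prior notes indicate code adjustment may be needed"] else parts
  let parts := if (["auth","authorization","prior auth"].any (fun w => PySem.Str.isIn w t)) then parts ++ ["Verify authorization — prior notes indicate auth was required"] else parts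
  let parts := if (["bill patient","patient pay","deductible","copay"].any (fun w => PySem.Str.isIn w t)) then parts ++ ["Bill patient — prior notes indicate patient financial responsibility"] else parts
  let parts := if (["resubmit","corrected","re-filed","reprocessed"].any (fun w => PySem.Str.isIn w t)) then parts ++ ["Resubmit with corrections — prior notes indicate resubmission resolved similar claims"] else parts
  let parts := if (["timely","filing","deadline"].any (fun w => PySem.Str.isIn w t)) then parts ++ ["Check timely filing window — prior notes reference filing deadline concerns"] else parts
  if !parts.isEmpty then PySem.Str.join "  |  " parts
  else "Review prior activity notes — manual review recommended; no clear action pattern found"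

-- ===== PORT B =====
def pvRules : List (List String × String) := [
  (["modifier","mod 25","mod 51","mod 59","add mod"],
   "Review modifier — prior notes show modifier was added previously"),
  (["medical record","mr","appeal"],
   "Prepare Medical Records (MR) — prior notes indicate MR submission was required"),
  (["adjust","non-billable","non billable","write off","write-off"],
   "Consult coding team — prior notes indicate code adjustment may be needed"),
  (["auth","authorization","prior auth"],
   "Verify authorization — prior notes indicate auth was required"),
  (["bill patient","patient pay","deductible","copay"],
   "Bill patient — prior notes indicate patient financial responsibility"),
  (["resubmit","corrected","re-filed","reprocessed"],
   "Resubmit with corrections — prior notes indicate resubmission resolved similar claims"),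
  (["timely","filing","deadline"],
   "Check timely filing window — prior notes reference filing deadline concerns")]

def notes_to_action_alt (notes : String) : String :=
  if PySem.Str.len notes == 0 then "" else
  let t := PySem.Str.lower notes
  let matched : PySem.Set Int :=
    (PySem.List.pyRange 0 (PySem.Str.len t) 1).foldl
      (fun m i => (PySem.List.enumerate pvRules).foldl
        (fun m ri =>
          if !(PySem.Set.contains m ri.1) &&
             ri.2.1.any (fun k => PySem.Str.slice t (some i) (some (i + PySem.Str.len k)) == k)
          then PySem.Set.add m ri.1 else m) m)
      PySem.Set.empty
  let parts := (PySem.List.enumerate pvRules).filterMap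
    (fun ri => if PySem.Set.contains matched ri.1 then some ri.2.2 else none)
  if !parts.isEmpty then PySem.Str.join "  |  " parts
  else "Review prior activity notes — manual review recommended; no clear action pattern found"

-- ===== PRECONDITION & SPEC =====
def Spec_notes_to_action (notes : String) (out : String) : Prop := out = notes_to_action_alt notes
instance (notes : String) (out : String) : Decidable (Spec_notes_to_action notes out) := by unfold Spec_notes_to_action; infer_instance

-- ===== CLAIM =====
def Claim_equal_notes_to_action : Prop := ∀ (notes : String), Dom_notes_to_action notes → Spec_notes_to_action notes (notes_to_action notes)

-- ===== LEMMAS AND PROOFS =====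

-- membership after the inner guarded-add loop over the rule table
theorem pv_mem_inner {β : Type} (rs : List (Int × β)) (P : Int × β → Bool)
    (m : PySem.Set Int) (r : Int) :
    (r ∈ rs.foldl (fun m ri => if !(PySem.Set.contains m ri.1) && P ri then PySem.Set.add m ri.1 else m) m) ↔
    r ∈ m ∨ ∃ ri ∈ rs, r = ri.1 ∧ P ri = true := by
  induction rs generalizing m with
  | nil => simp
  | cons a rs ih =>
    simp only [List.foldl_cons]
    by_cases hc : PySem.Set.contains m a.1 = true
    · by_cases hp : P a = true <;>
        · simp only [hc, hp, Bool.not_true, Bool.false_and, ih, List.mem_cons]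
          have := (PySem.Set.contains_iff m a.1).mp hc
          constructor
          · rintro (h | ⟨ri, hri, h1, h2⟩)
            · exact Or.inl h
            · exact Or.inr ⟨ri, Or.inr hri, h1, h2⟩
          · rintro (h | ⟨ri, hri, h1, h2⟩)
            · exact Or.inl h
            · rcases hri with rfl | hri
              · exact Or.inl (h1 ▸ this)
              · exact Or.inr ⟨ri, hri, h1, h2⟩
    · by_cases hp : P a = true
      · have hc' : PySem.Set.contains m a.1 = false := by simpa using hc
        simp only [hc', hp, Bool.not_false, Bool.true_and, if_pos, ih, PySem.Set.mem_add,
          List.mem_cons]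
        constructor
        · rintro ((h | h) | ⟨ri, hri, h1, h2⟩)
          · exact Or.inl h
          · exact Or.inr ⟨a, Or.inl rfl, h, hp⟩
          · exact Or.inr ⟨ri, Or.inr hri, h1, h2⟩
        · rintro (h | ⟨ri, hri, h1, h2⟩)
          · exact Or.inl (Or.inl h)
          · rcases hri with rfl | hri
            · exact Or.inl (Or.inr h1)
            · exact Or.inr ⟨ri, hri, h1, h2⟩
      · have hp' : P a = false := by simpa using hp
        simp only [hp', Bool.and_false, ih, List.mem_cons, Bool.false_eq_true]
        constructor
        · rintro (h | ⟨ri, hri, h1, h2⟩)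
          · exact Or.inl h
          · exact Or.inr ⟨ri, Or.inr hri, h1, h2⟩
        · rintro (h | ⟨ri, hri, h1, h2⟩)
          · exact Or.inl h
          · rcases hri with rfl | hri
            · exact absurd h2 (by simp [hp'])
            · exact Or.inr ⟨ri, hri, h1, h2⟩

-- membership after the outer scan over all positions
theorem pv_mem_outer {β : Type} (is : List Int) (rs : List (Int × β)) (P : Int → Int × β → Bool)
    (m : PySem.Set Int) (r : Int) :
    (r ∈ is.foldl (fun m i => rs.foldl
        (fun m ri => if !(PySem.Set.contains m ri.1) && P i ri then PySem.Set.add m ri.1 else m) m) m) ↔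
    r ∈ m ∨ ∃ i ∈ is, ∃ ri ∈ rs, r = ri.1 ∧ P i ri = true := by
  induction is generalizing m with
  | nil => simp
  | cons i is ih =>
    simp only [List.foldl_cons, ih, pv_mem_inner, List.mem_cons]
    constructor
    · rintro ((h | ⟨ri, hri, h1, h2⟩) | ⟨j, hj, ri, hri, h1, h2⟩)
      · exact Or.inl h
      · exact Or.inr ⟨i, Or.inl rfl, ri, hri, h1, h2⟩
      · exact Or.inr ⟨j, Or.inr hj, ri, hri, h1, h2⟩
    · rintro (h | ⟨j, hj, ri, hri, h1, h2⟩)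
      · exact Or.inl (Or.inl h)
      · rcases hj with rfl | hj
        · exact Or.inl (Or.inr ⟨ri, hri, h1, h2⟩)
        · exact Or.inr ⟨j, hj, ri, hri, h1, h2⟩

-- a positional slice comparison is a prefix test
theorem pv_slice_eq_iff (t k : String) (i : Int) (hi : 0 ≤ i) :
    (PySem.Str.slice t (some i) (some (i + PySem.Str.len k)) == k) = true ↔
    k.toList <+: t.toList.drop i.toNat := by
  have hk : 0 ≤ i + PySem.Str.len k := by
    have : PySem.Str.len k = (k.toList.length : Int) := by simp
    omega
  rw [PySem.Str.slice, PySem.Chars.slice, PySem.List.slice_toNat _ hi hk]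
  have hlen : (i + PySem.Str.len k).toNat - i.toNat = k.toList.length := by
    have : PySem.Str.len k = (k.toList.length : Int) := by simp
    omega
  rw [hlen]
  constructor
  · intro h
    have h' : (t.toList.drop i.toNat).take k.toList.length = k.toList := by
      have := String.ext_iff.mp (eq_of_beq h)
      simpa using this
    exact List.prefix_iff_eq_take.mpr h'.symm
  · intro h
    have h' := List.prefix_iff_eq_take.mp h
    have : String.ofList ((t.toList.drop i.toNat).take k.toList.length) = k := by
      apply String.ext_iff.mpr; simpa using h'.symm
    simpa [this]

-- a nonempty keyword occurs somewhere iff some scan position matches it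
theorem pv_exists_pos_iff (t k : String) (hk : k.toList ≠ []) :
    (∃ i ∈ PySem.List.pyRange 0 (PySem.Str.len t) 1,
        (PySem.Str.slice t (some i) (some (i + PySem.Str.len k)) == k) = true) ↔
    PySem.Str.isIn k t = true := by
  rw [PySem.Str.isIn_eq, ← PySem.Chars.exists_prefix_drop_iff_isIn]
  constructor
  · rintro ⟨i, hi, h⟩
    have hi' := (PySem.List.mem_pyRange_one).mp hi
    exact ⟨i.toNat, (pv_slice_eq_iff t k i hi'.1).mp h⟩
  · rintro ⟨j, hj⟩
    have hjl : j < t.toList.length := by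
      by_contra hge
      rw [List.drop_eq_nil_of_le (Nat.le_of_not_lt hge)] at hj
      exact hk (List.prefix_nil.mp hj)
    refine ⟨(j : Int), ?_, ?_⟩
    · rw [PySem.List.mem_pyRange_one]
      constructor
      · exact_mod_cast Nat.zero_le j
      · have : PySem.Str.len t = (t.toList.length : Int) := by simp
        omega
    · rw [pv_slice_eq_iff t k _ (by exact_mod_cast Nat.zero_le j)]
      simpa using hj
--
-- per-rule bridge: scanning all positions for any keyword of a rule equals the membership test
theorem pv_rule_iff (t : String) (kws : List String) (h : ∀ k ∈ kws, k.toList ≠ []) :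
    (∃ i ∈ PySem.List.pyRange 0 (PySem.Str.len t) 1,
        (kws.any (fun k => PySem.Str.slice t (some i) (some (i + PySem.Str.len k)) == k)) = true) ↔
    (kws.any (fun w => PySem.Str.isIn w t)) = true := by
  simp only [List.any_eq_true]
  constructor
  · rintro ⟨i, hi, k, hk, hm⟩
    exact ⟨k, hk, (pv_exists_pos_iff t k (h k hk)).mp ⟨i, hi, hm⟩⟩
  · rintro ⟨k, hk, hm⟩
    obtain ⟨i, hi, hm'⟩ := (pv_exists_pos_iff t k (h k hk)).mpr hm
    exact ⟨i, hi, k, hk, hm'⟩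

-- the matched-set of B's scan: characterisation and per-rule reading
theorem pv_key (t : String) (r : Int) :
    PySem.Set.contains
      ((PySem.List.pyRange 0 (PySem.Str.len t) 1).foldl
        (fun m i => (PySem.List.enumerate pvRules).foldl
          (fun m ri =>
            if !(PySem.Set.contains m ri.1) &&
               ri.2.1.any (fun k => PySem.Str.slice t (some i) (some (i + PySem.Str.len k)) == k)
            then PySem.Set.add m ri.1 else m) m)
        PySem.Set.empty) r = true ↔
    ∃ i ∈ PySem.List.pyRange 0 (PySem.Str.len t) 1, ∃ ri ∈ PySem.List.enumerate pvRules,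
      r = ri.1 ∧ (ri.2.1.any (fun k => PySem.Str.slice t (some i) (some (i + PySem.Str.len k)) == k)) = true := by
  rw [PySem.Set.contains_iff,
    pv_mem_outer (PySem.List.pyRange 0 (PySem.Str.len t) 1) (PySem.List.enumerate pvRules)
      (fun i ri => ri.2.1.any (fun k => PySem.Str.slice t (some i) (some (i + PySem.Str.len k)) == k))
      PySem.Set.empty r]
  simp [PySem.Set.empty]

theorem pv_rule (t : String) (r : Int) (kws : List String) (act : String)
    (hmem : (r, (kws, act)) ∈ PySem.List.enumerate pvRules)
    (huniq : ∀ ri ∈ PySem.List.enumerate pvRules, r = ri.1 → ri.2.1 = kws)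
    (hne : ∀ k ∈ kws, k.toList ≠ []) :
    PySem.Set.contains
      ((PySem.List.pyRange 0 (PySem.Str.len t) 1).foldl
        (fun m i => (PySem.List.enumerate pvRules).foldl
          (fun m ri =>
            if !(PySem.Set.contains m ri.1) &&
               ri.2.1.any (fun k => PySem.Str.slice t (some i) (some (i + PySem.Str.len k)) == k)
            then PySem.Set.add m ri.1 else m) m)
        PySem.Set.empty) r = (kws.any (fun w => PySem.Str.isIn w t)) := by
  rw [Bool.eq_iff_iff, pv_key, ← pv_rule_iff t kws hne]
  constructor
  · rintro ⟨i, hi, ri, hri, hr, hp⟩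
    refine ⟨i, hi, ?_⟩
    rw [huniq ri hri hr] at hp
    exact hp
  · rintro ⟨i, hi, hp⟩
    exact ⟨i, hi, (r, (kws, act)), hmem, rfl, hp⟩

-- ===== VERDICT =====
set_option maxHeartbeats 4000000 in
theorem notes_to_action_spec : Claim_equal_notes_to_action := by
  intro notes _
  unfold Spec_notes_to_action notes_to_action notes_to_action_alt
  by_cases h0 : (PySem.Str.len notes == 0) = true
  · simp only [h0, if_true]
  · simp only [h0, if_false, Bool.false_eq_true]
    generalize PySem.Str.lower notes = t
    have h1 := pv_rule t 0 ["modifier","mod 25","mod 51","mod 59","add mod"] "Review modifier — prior notes show modifier was added previously"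
      (by simp [pvRules, PySem.List.enumerate]) (by decide) (by decide)
    have h2 := pv_rule t 1 ["medical record","mr","appeal"] "Prepare Medical Records (MR) — prior notes indicate MR submission was required"
      (by simp [pvRules, PySem.List.enumerate]) (by decide) (by decide)
    have h3 := pv_rule t 2 ["adjust","non-billable","non billable","write off","write-off"] "Consult coding team — prior notes indicate code adjustment may be needed"
      (by simp [pvRules, PySem.List.enumerate]) (by decide) (by decide)
    have h4 := pv_rule t 3 ["auth","authorization","prior auth"] "Verify authorization — prior notes indicate auth was required"
      (by simp [pvRules, PySem.List.enumerate]) (by decide) (by decide)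
    have h5 := pv_rule t 4 ["bill patient","patient pay","deductible","copay"] "Bill patient — prior notes indicate patient financial responsibility"
      (by simp [pvRules, PySem.List.enumerate]) (by decide) (by decide)
    have h6 := pv_rule t 5 ["resubmit","corrected","re-filed","reprocessed"] "Resubmit with corrections — prior notes indicate resubmission resolved similar claims"
      (by simp [pvRules, PySem.List.enumerate]) (by decide) (by decide)
    have h7 := pv_rule t 6 ["timely","filing","deadline"] "Check timely filing window — prior notes reference filing deadline concerns"
      (by simp [pvRules, PySem.List.enumerate]) (by decide) (by decide)
    simp only [PySem.List.enumerate, pvRules, List.filterMap, Int.reduceAdd] at h1 h2 h3 h4 h5 h6 h7 ⊢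
    rw [h1, h2, h3, h4, h5, h6, h7]
    generalize (["modifier","mod 25","mod 51","mod 59","add mod"].any (fun w => PySem.Str.isIn w t)) = b1
    generalize (["medical record","mr","appeal"].any (fun w => PySem.Str.isIn w t)) = b2
    generalize (["adjust","non-billable","non billable","write off","write-off"].any (fun w => PySem.Str.isIn w t)) = b3
    generalize (["auth","authorization","prior auth"].any (fun w => PySem.Str.isIn w t)) = b4
    generalize (["bill patient","patient pay","deductible","copay"].any (fun w => PySem.Str.isIn w t)) = b5
    generalize (["resubmit","corrected","re-filed","reprocessed"].any (fun w => PySem.Str.isIn w t)) = b6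
    generalize (["timely","filing","deadline"].any (fun w => PySem.Str.isIn w t)) = b7
    cases b1 <;> cases b2 <;> cases b3 <;> cases b4 <;> cases b5 <;> cases b6 <;> cases b7 <;> rfl
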